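-- pv_equiv track=rewrite | github.com/behnamdosti1189-lab/GFG_problem_of_the_day | 112.killing_spree.py | killinSpree
-- ===== SOURCE A (Python) =====
-- def killinSpree (n):
--     # code here
--     low = 1
--     high = 1000000
--     count = 0
--     while(low<=high):
--         mid = low+(high-low)//2
--         val = mid*(mid+1)*(2*mid+1)//6
--         if val <= n:
--             ans = mid
--             low = mid+1
--         else:
--             high = mid-1
--     return ans
-- ===== SOURCE B (Python) =====
-- def killinSpree(n):
--     # Linear forward scan with an incremental running sum of squares,
--     # capped at 1000000 like the original search range.
--     m = 0
--     s = 0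
--     while m < 1000000 and s + (m + 1) * (m + 1) <= n:
--         m += 1
--         s += m * m
--     return m
-- ===== Notes on version B (the rewrite author's own statement) =====
-- stated objective: simpler
-- what changed: Replaces the binary search over [1,1000000] with closed-form sum values by a linear forward scan that maintains the running sum of squares incrementally and stops at the first m whose next square would exceed n (capped at 1000000).
-- outside the precondition, e.g. on killinSpree(0): A raises UnboundLocalError, B returns 0
-- crash fix: For n < 1 A raises UnboundLocalError (ans is never assigned); B returns 0. — e.g. on killinSpree(0): A raises UnboundLocalError, B returns 0
import Mathlib
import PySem

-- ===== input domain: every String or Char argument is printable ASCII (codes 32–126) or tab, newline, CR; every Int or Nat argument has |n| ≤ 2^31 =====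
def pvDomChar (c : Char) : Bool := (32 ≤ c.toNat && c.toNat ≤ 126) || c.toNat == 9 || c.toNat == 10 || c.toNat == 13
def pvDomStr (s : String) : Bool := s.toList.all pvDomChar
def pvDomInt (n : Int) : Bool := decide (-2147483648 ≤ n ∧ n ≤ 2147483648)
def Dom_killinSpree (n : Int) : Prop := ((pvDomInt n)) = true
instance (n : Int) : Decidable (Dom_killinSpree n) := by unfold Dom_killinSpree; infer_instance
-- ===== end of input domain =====

-- B replaces A's binary search by a simpler linear scan with an incremental running
-- sum of squares; equivalence is claimed on n ≥ 1 (A raises UnboundLocalError for n < 1).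

-- ===== PORT A =====
-- while(low<=high) loop of A; ans starts unassigned (none); returning none = UnboundLocalError
def killinSpreeGo (n low high : Int) (ans : Option Int) : Option Int :=
  if _h : low ≤ high then
    let mid := low + PySem.Int.floordiv (high - low) 2
    let val := PySem.Int.floordiv (mid * (mid + 1) * (2 * mid + 1)) 6
    if val ≤ n then
      killinSpreeGo n (mid + 1) high (some mid)
    else
      killinSpreeGo n low (mid - 1) ans
  else ans
termination_by (high + 1 - low).toNat
decreasing_by
  · simp only [PySem.Int.floordiv_eq_ediv_of_pos (by omega : (0:Int) < 2)]
    omega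
  · simp only [PySem.Int.floordiv_eq_ediv_of_pos (by omega : (0:Int) < 2)]
    omega

-- return ans: Pre_ excludes the inputs where ans is unassigned (Python raises); 0 is a dummy
def killinSpree (n : Int) : Int := (killinSpreeGo n 1 1000000 none).getD 0

-- ===== PORT B =====
-- B's while loop: fuel = 1000000 - m implements the `m < 1000000` cap
def killinSpreeAltGo (fuel : Nat) (m s n : Int) : Int :=
  match fuel with
  | 0 => m
  | f + 1 =>
      if s + (m + 1) * (m + 1) ≤ n then
        killinSpreeAltGo f (m + 1) (s + (m + 1) * (m + 1)) n
      else m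

def killinSpree_alt (n : Int) : Int := killinSpreeAltGo 1000000 0 0 n

-- ===== PRECONDITION & SPEC =====
-- Pre_ excludes n < 1, on which A raises UnboundLocalError (ans is never assigned).
def Pre_killinSpree (n : Int) : Prop := 1 ≤ n
instance (n : Int) : Decidable (Pre_killinSpree n) := by unfold Pre_killinSpree; infer_instance
def pvWitness_killinSpree : Int := (5)

-- For n < 1 A raises UnboundLocalError (ans is never assigned); B returns 0.
def Raises_killinSpree (n : Int) : Prop := n < 1
instance (n : Int) : Decidable (Raises_killinSpree n) := by unfold Raises_killinSpree; infer_instance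
def pvRaiseWitness_killinSpree : Int := (0)
def pvRaiseWitnessOut_killinSpree : Int := 0

def Spec_killinSpree (n : Int) (out : Int) : Prop := out = killinSpree_alt n
instance (n : Int) (out : Int) : Decidable (Spec_killinSpree n out) := by unfold Spec_killinSpree; infer_instance

-- ===== CLAIM (what is proved, stated in full; the proofs are below) =====
def Claim_equal_killinSpree : Prop := ∀ (n : Int), Dom_killinSpree n → Pre_killinSpree n → Spec_killinSpree n (killinSpree n)
def Claim_raises_killinSpree : Prop := (∀ (n : Int), Dom_killinSpree n → Raises_killinSpree n → ¬ Pre_killinSpree n) ∧ (Dom_killinSpree (pvRaiseWitness_killinSpree) ∧ Raises_killinSpree (pvRaiseWitness_killinSpree) ∧ killinSpree_alt (pvRaiseWitness_killinSpree) = pvRaiseWitnessOut_killinSpree)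

-- ===== LEMMAS AND PROOFS =====

-- g m = 6 * (sum of the first m squares) = m(m+1)(2m+1)
def pvG (m : Int) : Int := m * (m + 1) * (2 * m + 1)

-- characterisation of the answer: largest m in [1,10^6] with m(m+1)(2m+1)//6 ≤ n
def pvIsAns (n r : Int) : Prop :=
  1 ≤ r ∧ r ≤ 1000000 ∧ pvG r ≤ 6 * n + 5 ∧ (r = 1000000 ∨ 6 * n + 5 < pvG (r + 1))

theorem pvG_mono {a b : Int} (ha : 0 ≤ a) (hab : a ≤ b) : pvG a ≤ pvG b := by
  have hb : 0 ≤ b := ha.trans hab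
  unfold pvG
  nlinarith [mul_nonneg ha hb, mul_nonneg hb hb, mul_nonneg ha ha,
    mul_nonneg (sub_nonneg.2 hab) (mul_nonneg ha hb),
    mul_nonneg (sub_nonneg.2 hab) (mul_nonneg hb hb)]

theorem pvIsAns_uniq {n r r' : Int} (h : pvIsAns n r) (h' : pvIsAns n r') : r = r' := by
  obtain ⟨h1, h2, h3, h4⟩ := h
  obtain ⟨h1', h2', h3', h4'⟩ := h'
  by_contra hne
  rcases lt_or_gt_of_ne hne with hlt | hgt
  · rcases h4 with rfl | h4
    · omega
    · have : pvG (r + 1) ≤ pvG r' := pvG_mono (by omega) (by omega)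
      omega
  · rcases h4' with rfl | h4'
    · omega
    · have : pvG (r' + 1) ≤ pvG r := pvG_mono (by omega) (by omega)
      omega

theorem pvVal_le_iff {m n : Int} :
    PySem.Int.floordiv (m * (m + 1) * (2 * m + 1)) 6 ≤ n ↔ pvG m ≤ 6 * n + 5 := by
  rw [PySem.Int.floordiv_eq_ediv_of_pos (by omega : (0:Int) < 6)]
  unfold pvG
  omega

theorem killinSpreeGo_correct (n : Int) (hn : 1 ≤ n) :
    ∀ (k : Nat) (low high : Int) (ans : Option Int), (high + 1 - low).toNat = k →
    1 ≤ low → high ≤ 1000000 → low ≤ high + 1 →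
    (ans = none ∧ low = 1 ∨ ∃ a, ans = some a ∧ a = low - 1 ∧ 1 ≤ a ∧ pvG a ≤ 6 * n + 5) →
    (high = 1000000 ∨ 6 * n + 5 < pvG (high + 1)) →
    ∃ r, killinSpreeGo n low high ans = some r ∧ pvIsAns n r := by
  intro k
  induction k using Nat.strong_induction_on with
  | _ k ih =>
    intro low high ans hk hlow hhigh hlh hinv hhinv
    rw [killinSpreeGo]
    by_cases h : low ≤ high
    · simp only [dif_pos h]
      set mid := low + PySem.Int.floordiv (high - low) 2 with hmiddef
      have hmid : low ≤ mid ∧ mid ≤ high := by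
        rw [hmiddef, PySem.Int.floordiv_eq_ediv_of_pos (by omega : (0:Int) < 2)]
        omega
      clear_value mid
      have hd1 : (high + 1 - (mid + 1)).toNat < k := by clear hinv hhinv; omega
      have hd2 : (mid - 1 + 1 - low).toNat < k := by clear hinv hhinv; omega
      have hb1 : 1 ≤ mid + 1 := by clear hinv hhinv; omega
      have hb2 : mid + 1 ≤ high + 1 := by clear hinv hhinv; omega
      have hb3 : mid = mid + 1 - 1 := by clear hinv hhinv; omega
      have hb4 : 1 ≤ mid := by clear hinv hhinv; omega
      have hb5 : low ≤ mid - 1 + 1 := by clear hinv hhinv; omega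
      have hb6 : mid - 1 ≤ 1000000 := by clear hinv hhinv; omega
      by_cases hval : PySem.Int.floordiv (mid * (mid + 1) * (2 * mid + 1)) 6 ≤ n
      · rw [if_pos hval]
        exact ih (high + 1 - (mid + 1)).toNat hd1 (mid + 1) high (some mid) rfl
          hb1 hhigh hb2
          (Or.inr ⟨mid, rfl, hb3, hb4, pvVal_le_iff.1 hval⟩) hhinv
      · rw [if_neg hval]
        have hg : 6 * n + 5 < pvG mid := by
          have h6 := (not_iff_not.2 (pvVal_le_iff (m := mid) (n := n))).1 hval
          clear hinv hhinv
          omega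
        exact ih (mid - 1 + 1 - low).toNat hd2 low (mid - 1) ans rfl
          hlow hb6 hb5 hinv (Or.inr (by simpa using hg))
    · simp only [dif_neg h]
      rcases hinv with ⟨rfl, rfl⟩ | ⟨a, rfl, ha1, ha2, ha3⟩
      · exfalso
        have h0 : high = 0 := by omega
        subst h0
        have : pvG (0 + 1) = 6 := by norm_num [pvG]
        omega
      · refine ⟨a, rfl, ha2, by omega, ha3, ?_⟩
        have : a = high := by omega
        subst this
        exact hhinv

theorem killinSpreeAltGo_correct (n : Int) :
    ∀ (fuel : Nat) (m s : Int),
    0 ≤ m → m + fuel = 1000000 → 6 * s = pvG m → pvG m ≤ 6 * n + 5 →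
    m ≤ killinSpreeAltGo fuel m s n ∧ killinSpreeAltGo fuel m s n ≤ 1000000 ∧
    pvG (killinSpreeAltGo fuel m s n) ≤ 6 * n + 5 ∧
    (killinSpreeAltGo fuel m s n = 1000000 ∨ 6 * n + 5 < pvG (killinSpreeAltGo fuel m s n + 1)) := by
  intro fuel
  induction fuel with
  | zero =>
    intro m s hm hf hs hg
    simp only [killinSpreeAltGo]
    omega
  | succ f ih =>
    intro m s hm hf hs hg
    have hstep : pvG (m + 1) = 6 * (s + (m + 1) * (m + 1)) := by
      unfold pvG at hs ⊢; ring_nf; ring_nf at hs; omega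
    simp only [killinSpreeAltGo]
    by_cases hc : s + (m + 1) * (m + 1) ≤ n
    · rw [if_pos hc]
      have := ih (m + 1) (s + (m + 1) * (m + 1)) (by omega) (by omega) (by omega) (by omega)
      omega
    · rw [if_neg hc]
      refine ⟨le_refl m, by omega, hg, Or.inr ?_⟩
      omega

theorem killinSpree_alt_isAns (n : Int) (hn : 1 ≤ n) : pvIsAns n (killinSpree_alt n) := by
  have hfirst : killinSpree_alt n = killinSpreeAltGo 999999 1 1 n := by
    unfold killinSpree_alt
    rw [show (1000000 : Nat) = 999999 + 1 from rfl, killinSpreeAltGo]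
    rw [if_pos (by omega : (0:Int) + (0 + 1) * (0 + 1) ≤ n)]
    norm_num
  rw [hfirst]
  have := killinSpreeAltGo_correct n 999999 1 1 (by omega) (by omega)
    (by norm_num [pvG]) (by norm_num [pvG]; omega)
  exact ⟨by omega, by omega, by omega, by omega⟩

-- ===== VERDICT (by name: the statement is the Claim_ definition above) =====
theorem killinSpree_spec : Claim_equal_killinSpree := by
  intro n _ hpre
  unfold Spec_killinSpree killinSpree
  obtain ⟨r, hr, hisr⟩ := killinSpreeGo_correct n hpre 1000000 1 1000000 none (by omega)
    (by omega) (by omega) (by omega) (Or.inl ⟨rfl, rfl⟩) (Or.inl rfl)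
  rw [hr, Option.getD_some]
  exact pvIsAns_uniq hisr (killinSpree_alt_isAns n hpre)

theorem killinSpree_raises : Claim_raises_killinSpree := by
  unfold Claim_raises_killinSpree
  refine ⟨fun n _ hr hp => ?_, by decide, by decide, ?_⟩
  · unfold Pre_killinSpree at hp
    unfold Raises_killinSpree at hr
    omega
  · show killinSpree_alt 0 = 0
    rw [killinSpree_alt, show (1000000 : Nat) = 999999 + 1 from rfl, killinSpreeAltGo]
    norm_num

-- recorded consequence of killinSpree_raises: B's port indeed returns 0 at the raise witness n = 0
theorem killinSpree_alt_raiseWitness_ok : killinSpree_alt 0 = 0 := killinSpree_raises.2.2.2
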